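-- pv_equiv track=rewrite | github.com/shreyas10p/DataStructures_and_Algorithms | others/leetcode.py | checkGoodNum
-- ===== SOURCE A (Python) =====
-- def checkGoodNum(num: int) -> bool:
--     goodNum = [2,5,6,9]
--     while(num>0):
--         if((num%10) not in goodNum):
--             return False
--         else:
--             num=num//10
--     return True
-- ===== SOURCE B (Python) =====
-- def checkGoodNum(num: int) -> bool:
--     # num <= 0: the digit loop in the spec is vacuous, so the answer is True
--     return num <= 0 or all(c in '2569' for c in str(num))
-- ===== Notes on version B (the rewrite author's own statement) =====
-- stated objective: idiomatic
-- what changed: B tests the decimal string representation character by character instead of extracting digits arithmetically with modulus and floor division in a while loop.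
import Mathlib
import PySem

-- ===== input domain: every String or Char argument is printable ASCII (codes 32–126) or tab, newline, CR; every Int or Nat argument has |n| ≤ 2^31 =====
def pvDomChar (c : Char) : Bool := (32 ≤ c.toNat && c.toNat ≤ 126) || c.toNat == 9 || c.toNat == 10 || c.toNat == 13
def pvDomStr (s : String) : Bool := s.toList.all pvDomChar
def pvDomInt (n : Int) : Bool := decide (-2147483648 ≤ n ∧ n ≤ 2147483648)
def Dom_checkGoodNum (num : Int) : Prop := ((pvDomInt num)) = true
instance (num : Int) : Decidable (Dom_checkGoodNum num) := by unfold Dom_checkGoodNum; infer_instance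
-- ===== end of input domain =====

-- B tests the decimal string representation character by character instead of extracting digits by repeated modulus and floor division (idiomatic, same cost).


-- ===== PORT A =====
-- while loop: test the last decimal digit, then floor-divide
def checkGoodNum (num : Int) : Bool :=
  if num > 0 then
    if (PySem.Int.mod num 10) ∉ ([2, 5, 6, 9] : List Int) then
      false
    else
      checkGoodNum (PySem.Int.floordiv num 10)
  else
    true
termination_by num.toNat
decreasing_by
  simp only [PySem.Int.floordiv]
  have h1 : Int.fdiv num 10 = num / 10 := Int.fdiv_eq_ediv_of_nonneg num (by omega)
  omega

-- ===== PORT B =====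
-- return num <= 0 or all(c in '2569' for c in str(num))
def checkGoodNum_alt (num : Int) : Bool :=
  decide (num ≤ 0) || (PySem.Int.toStr num).toList.all (fun c => c ∈ (['2', '5', '6', '9'] : List Char))

-- ===== PRECONDITION & SPEC =====
def Spec_checkGoodNum (num : Int) (out : Bool) : Prop := out = checkGoodNum_alt num
instance (num : Int) (out : Bool) : Decidable (Spec_checkGoodNum num out) := by unfold Spec_checkGoodNum; infer_instance

-- ===== CLAIM (what is proved, stated in full; the proofs are below) =====
def Claim_equal_checkGoodNum : Prop := ∀ (num : Int), Dom_checkGoodNum num → Spec_checkGoodNum num (checkGoodNum num)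

-- ===== LEMMAS AND PROOFS =====

def pvGoodC (c : Char) : Bool := c ∈ (['2', '5', '6', '9'] : List Char)

lemma pvDigitChar_good (r : Nat) (hr : r < 10) :
    pvGoodC (Nat.digitChar r) = decide ((r : Int) ∈ ([2, 5, 6, 9] : List Int)) := by
  interval_cases r <;> decide

lemma pvCheck_unfold_pos (n : Nat) (hn : 0 < n) :
    checkGoodNum (n : Int) =
      (decide (((n % 10 : Nat) : Int) ∈ ([2, 5, 6, 9] : List Int)) && checkGoodNum ((n / 10 : Nat) : Int)) := by
  rw [checkGoodNum]
  have hpos : (n : Int) > 0 := by exact_mod_cast hn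
  have hmod : PySem.Int.mod (n : Int) 10 = ((n % 10 : Nat) : Int) := by
    have : ((n : Int)).fmod 10 = (n : Int) % 10 := Int.fmod_eq_emod_of_nonneg _ (by omega)
    simp [PySem.Int.mod, this]
  have hdiv : PySem.Int.floordiv (n : Int) 10 = ((n / 10 : Nat) : Int) := by
    have : ((n : Int)).fdiv 10 = (n : Int) / 10 := Int.fdiv_eq_ediv_of_nonneg _ (by omega)
    simp [PySem.Int.floordiv, this]
  rw [if_pos hpos, hmod, hdiv]
  by_cases hmem : ((n % 10 : Nat) : Int) ∈ ([2, 5, 6, 9] : List Int) <;> simp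

lemma pvCore_all (f : Nat) : ∀ (n : Nat) (acc : List Char), 0 < n → n < f →
    (Nat.toDigitsCore 10 f n acc).all pvGoodC = (checkGoodNum (n : Int) && acc.all pvGoodC) := by
  induction f with
  | zero => intro n acc h1 h2; omega
  | succ f ih =>
    intro n acc h1 h2
    rw [Nat.toDigitsCore]
    rw [pvCheck_unfold_pos n h1]
    have hgood := pvDigitChar_good (n % 10) (Nat.mod_lt _ (by omega))
    by_cases hq : n / 10 = 0
    · have : checkGoodNum ((n / 10 : Nat) : Int) = true := by
        rw [hq]; rw [checkGoodNum]; simp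
      simp [hq, List.all_cons, hgood]
      rw [show checkGoodNum 0 = true from by rw [checkGoodNum]; simp]
      simp
    · have hlt : n / 10 < f := by
        have : n / 10 < n := Nat.div_lt_self h1 (by omega)
        omega
      rw [if_neg hq, ih (n / 10) _ (Nat.pos_of_ne_zero hq) hlt]
      simp [List.all_cons, hgood]
      by_cases hm : ((n % 10 : Nat) : Int) ∈ ([2, 5, 6, 9] : List Int) <;>
        by_cases hc : checkGoodNum ((n / 10 : Nat) : Int) = true <;>
        simp_all

-- ===== VERDICT (by name: the statement is the Claim_ definition above) =====
theorem checkGoodNum_spec : Claim_equal_checkGoodNum := by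
  intro num _
  unfold Spec_checkGoodNum checkGoodNum_alt
  by_cases hle : num ≤ 0
  · rw [checkGoodNum]
    simp [hle, not_lt.mpr hle]
  · rw [not_le] at hle
    have hnn : ¬ num < 0 := by omega
    have hrepr : num = ((num.toNat : Nat) : Int) := by omega
    have h0 : 0 < num.toNat := by omega
    simp only [PySem.Int.toStr, PySem.Int.toChars, if_neg hnn, String.toList_ofList]
    rw [show (decide (num ≤ 0)) = false by simp [hle, not_le]]
    rw [Bool.false_or]
    have := pvCore_all (num.toNat + 1) num.toNat [] h0 (by omega)
    simp only [Nat.toDigits] at *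
    rw [show (List.all (Nat.toDigitsCore 10 (num.toNat + 1) num.toNat []) fun c =>
          c ∈ (['2', '5', '6', '9'] : List Char)) =
        (Nat.toDigitsCore 10 (num.toNat + 1) num.toNat []).all pvGoodC from rfl]
    rw [this, ← hrepr]
    simp
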